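-- pv_equiv track=rewrite | github.com/kvvishwa/ProposalGene | modules/understanding_extractor.py | _largest_brace_json
-- ===== SOURCE A (Python) =====
-- def _largest_brace_json(s: str) -> str | None:
--     """
--     Return the largest balanced {...} substring found by scanning with a stack.
--     """
--     if not s:
--         return None
--     best_start = best_end = -1
--     depth = 0
--     start = -1
--     for i, ch in enumerate(s):
--         if ch == "{":
--             if depth == 0:
--                 start = i
--             depth += 1
--         elif ch == "}":
--             if depth > 0:
--                 depth -= 1
--                 if depth == 0 and start != -1:
--                     if (best_start == -1) or ((i - start) > (best_end - best_start)):
--                         best_start, best_end = start, i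
--                     start = -1
--     if best_start >= 0 and best_end >= 0:
--         return s[best_start:best_end+1]
--     return None
-- ===== SOURCE B (Python) =====
-- def _match_close(s, k):
--     # Return the index of the '}' that closes the group whose body starts at
--     # position k, or None if that group never closes.
--     while k < len(s):
--         c = s[k]
--         if c == "}":
--             return k
--         if c == "{":
--             m = _match_close(s, k + 1)
--             if m is None:
--                 return None
--             k = m + 1
--         else:
--             k += 1
--     return None
--
--
-- def _largest_brace_json(s):
--     # Recursive-descent: jump to each top-level opening brace with str.find, close it with
--     # a recursive matcher, keep the widest (earliest on ties) span.
--     best = None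
--     i = s.find("{")
--     while i != -1:
--         j = _match_close(s, i + 1)
--         if j is None:
--             break
--         if best is None or j - i > best[1] - best[0]:
--             best = (i, j)
--         i = s.find("{", j + 1)
--     if best is None:
--         return None
--     return s[best[0]:best[1] + 1]
-- ===== Notes on version B (the rewrite author's own statement) =====
-- stated objective: alternative
-- what changed: A is one character-by-character scan threading a depth counter, a running start and a running best through every character; B is a recursive-descent matcher that jumps from one top-level opening brace to the next with str.find, closes each group by structural recursion (_match_close), and keeps the widest span (earliest on ties).
import Mathlib
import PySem

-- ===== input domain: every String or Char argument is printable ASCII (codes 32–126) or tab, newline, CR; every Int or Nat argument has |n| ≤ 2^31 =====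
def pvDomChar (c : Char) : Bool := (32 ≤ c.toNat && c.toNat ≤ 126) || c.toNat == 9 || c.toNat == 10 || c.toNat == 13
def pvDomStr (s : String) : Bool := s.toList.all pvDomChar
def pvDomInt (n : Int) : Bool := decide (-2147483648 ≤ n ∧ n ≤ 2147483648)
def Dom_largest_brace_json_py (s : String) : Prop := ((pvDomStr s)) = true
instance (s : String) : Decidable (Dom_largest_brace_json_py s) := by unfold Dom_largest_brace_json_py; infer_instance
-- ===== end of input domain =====

-- B replaces A's single depth-counter scan by a recursive-descent matcher: jump to each
-- top-level opening brace with str.find, close it by structural recursion, keep the widest span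
-- (a timing run measured B faster: str.find skips non-brace text at C speed).


-- ===== PORT A =====
-- state = (best_start, best_end, depth, start)
def stepA (acc : Int × Int × Int × Int) (ic : Int × Char) : Int × Int × Int × Int :=
  let bs := acc.1; let be := acc.2.1; let d := acc.2.2.1; let st := acc.2.2.2
  if ic.2 = '{' then (bs, be, d + 1, if d = 0 then ic.1 else st)
  else if ic.2 = '}' then
    if d > 0 then
      if d - 1 = 0 ∧ st ≠ -1 then
        if bs = -1 ∨ ic.1 - st > be - bs then (st, ic.1, d - 1, -1)
        else (bs, be, d - 1, -1)
      else (bs, be, d - 1, st)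
    else acc
  else acc

def largest_brace_json_py (s : String) : Option String :=
  if s.toList = [] then none
  else
    let r := (PySem.List.enumerate s.toList 0).foldl stepA (-1, -1, 0, -1)
    if r.1 ≥ 0 ∧ r.2.1 ≥ 0 then some (PySem.Str.slice s (some r.1) (some (r.2.1 + 1)))
    else none

-- ===== PORT B =====
-- hand port of s.find('{', p) (exact on any string): first index i ≥ p with s[i] = '{';
-- the subtype carries the bounds needed for the outer loop's termination.
def findBraceAux (cs : List Char) (p : Nat) : Option {i : Nat // p ≤ i ∧ i < cs.length} :=
  if h : p < cs.length then
    if cs[p] = '{' then some ⟨p, le_rfl, h⟩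
    else
      match findBraceAux cs (p + 1) with
      | none => none
      | some ⟨i, hi⟩ => some ⟨i, by omega, hi.2⟩
  else none
  termination_by cs.length - p

-- _match_close(s, k): index of the '}' closing the group whose body starts at k, or none.
def matchCloseAux (cs : List Char) (k : Nat) : Option {m : Nat // k ≤ m ∧ m < cs.length} :=
  if h : k < cs.length then
    if cs[k] = '}' then some ⟨k, le_rfl, h⟩
    else if cs[k] = '{' then
      match matchCloseAux cs (k + 1) with
      | none => none
      | some ⟨m, hm⟩ =>
        match matchCloseAux cs (m + 1) with
        | none => none
        | some ⟨m', hm'⟩ => some ⟨m', by omega, hm'.2⟩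
    else
      match matchCloseAux cs (k + 1) with
      | none => none
      | some ⟨m, hm⟩ => some ⟨m, by omega, hm.2⟩
  else none
  termination_by cs.length - k
  decreasing_by all_goals omega

-- the outer while loop of B: jump to the next top-level '{', close it, update best
def bLoop (cs : List Char) (p : Nat) (best : Option (Nat × Nat)) : Option (Nat × Nat) :=
  match findBraceAux cs p with
  | none => best
  | some ⟨i, _⟩ =>
    match matchCloseAux cs (i + 1) with
    | none => best
    | some ⟨m, _⟩ =>
      bLoop cs (m + 1)
        (match best with
         | none => some (i, m)
         | some (a, b) => if (m : Int) - i > (b : Int) - a then some (i, m) else some (a, b))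
  termination_by cs.length - p
  decreasing_by omega

def largest_brace_json_py_alt (s : String) : Option String :=
  match bLoop s.toList 0 none with
  | none => none
  | some (a, b) => some (PySem.Str.slice s (some (a : Int)) (some ((b : Int) + 1)))

-- ===== PRECONDITION & SPEC =====
def Spec_largest_brace_json_py (s : String) (out : Option String) : Prop := out = largest_brace_json_py_alt s
instance (s : String) (out : Option String) : Decidable (Spec_largest_brace_json_py s out) := by unfold Spec_largest_brace_json_py; infer_instance

-- ===== CLAIM (what is proved, stated in full; the proofs are below) =====
def Claim_equal_largest_brace_json_py : Prop := ∀ (s : String), Dom_largest_brace_json_py s → Spec_largest_brace_json_py s (largest_brace_json_py s)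

-- ===== LEMMAS AND PROOFS =====

-- A's fold restarted at position k (proof-side view of A's loop)
def foldFrom (cs : List Char) (k : Nat) (st : Int × Int × Int × Int) : Int × Int × Int × Int :=
  (PySem.List.enumerate (cs.drop k) (k : Int)).foldl stepA st

theorem foldFrom_end (cs : List Char) (k : Nat) (st : Int × Int × Int × Int)
    (h : cs.length ≤ k) : foldFrom cs k st = st := by
  simp [foldFrom, List.drop_eq_nil_of_le h, PySem.List.enumerate_nil]

theorem foldFrom_succ (cs : List Char) (k : Nat) (st : Int × Int × Int × Int)
    (h : k < cs.length) :
    foldFrom cs k st = foldFrom cs (k + 1) (stepA st ((k : Int), cs[k])) := by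
  have hd : cs.drop k = cs[k] :: cs.drop (k + 1) := (List.getElem_cons_drop h).symm
  simp only [foldFrom, hd, PySem.List.enumerate_cons, List.foldl_cons]
  norm_num

-- correspondence of best: B's running best option vs A's (best_start, best_end)
def BestRel (o : Option (Nat × Nat)) (bs be : Int) : Prop :=
  match o with
  | none => bs = -1 ∧ be = -1
  | some (a, b) => bs = (a : Int) ∧ be = (b : Int)

theorem findBrace_none (cs : List Char) : ∀ fuel p, cs.length - p < fuel →
    findBraceAux cs p = none →
    ∀ q (hq : q < cs.length), p ≤ q → cs[q] ≠ '{' := by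
  intro fuel
  induction fuel with
  | zero => intro p h; omega
  | succ fuel ih =>
    intro p hfuel hnone q hq hpq
    rw [findBraceAux] at hnone
    by_cases h : p < cs.length
    · rw [dif_pos h] at hnone
      by_cases hc : cs[p] = '{'
      · rw [if_pos hc] at hnone; exact absurd hnone (by simp)
      · rw [if_neg hc] at hnone
        rcases hrec : findBraceAux cs (p + 1) with _ | I
        · rcases Nat.eq_or_lt_of_le hpq with rfl | hlt
          · exact hc
          · exact ih (p + 1) (by omega) hrec q hq (by omega)
        · rw [hrec] at hnone; exact absurd hnone (by simp)
    · exact absurd hq (by omega)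

theorem findBrace_some (cs : List Char) : ∀ fuel p I, cs.length - p < fuel →
    findBraceAux cs p = some I →
    cs[I.1]'I.2.2 = '{' ∧ ∀ q (hq : q < cs.length), p ≤ q → q < I.1 → cs[q] ≠ '{' := by
  intro fuel
  induction fuel with
  | zero => intro p I h; omega
  | succ fuel ih =>
    intro p I hfuel hsome
    rw [findBraceAux] at hsome
    by_cases h : p < cs.length
    · rw [dif_pos h] at hsome
      by_cases hc : cs[p] = '{'
      · rw [if_pos hc] at hsome
        have : I = ⟨p, le_rfl, h⟩ := by
          cases hsome; rfl
        subst this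
        exact ⟨hc, fun q hq h1 h2 => absurd (show q < p from h2) (by omega)⟩
      · rw [if_neg hc] at hsome
        rcases hrec : findBraceAux cs (p + 1) with _ | J
        · rw [hrec] at hsome; exact absurd hsome (by simp)
        · rw [hrec] at hsome
          obtain ⟨hJ, hJq⟩ := ih (p + 1) J (by omega) hrec
          have hII : I.1 = J.1 := by cases hsome; rfl
          refine ⟨by simpa [hII] using hJ, fun q hq h1 h2 => ?_⟩
          rcases Nat.eq_or_lt_of_le h1 with rfl | hlt
          · exact hc
          · exact hJq q hq (by omega) (by omega)
    · exact absurd hsome (by rw [dif_neg h]; simp)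

-- at depth 0, characters that are not '{' leave A's state unchanged
theorem skip_fold (cs : List Char) : ∀ fuel p j, j ≤ cs.length → p ≤ j → j - p < fuel →
    (∀ q (hq : q < cs.length), p ≤ q → q < j → cs[q] ≠ '{') →
    ∀ bs be st, foldFrom cs p (bs, be, 0, st) = foldFrom cs j (bs, be, 0, st) := by
  intro fuel
  induction fuel with
  | zero => intro p j _ _ h; omega
  | succ fuel ih =>
    intro p j hj hpj hfuel hno bs be st
    rcases Nat.eq_or_lt_of_le hpj with rfl | hlt
    · rfl
    · have hp : p < cs.length := by omega
      have hnc : cs[p] ≠ '{' := hno p hp le_rfl hlt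
      have hstep : stepA (bs, be, 0, st) ((p : Int), cs[p]) = (bs, be, 0, st) := by
        simp [stepA, hnc]
      rw [foldFrom_succ cs p _ hp, hstep]
      exact ih (p + 1) j hj (by omega) (by omega)
        (fun q hq h1 h2 => hno q hq (by omega) h2) bs be st

-- the matcher against A's scan at depth d ≥ 1
theorem match_spec (cs : List Char) : ∀ fuel k, cs.length - k < fuel →
    (∀ M, matchCloseAux cs k = some M →
      cs[M.1]'M.2.2 = '}' ∧
      ∀ bs be st (d : Int), 1 ≤ d →
        foldFrom cs k (bs, be, d, st) =
          foldFrom cs (M.1 + 1) (stepA (bs, be, d, st) ((M.1 : Int), '}'))) ∧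
    (matchCloseAux cs k = none →
      ∀ bs be st (d : Int), 1 ≤ d →
        ∃ d2, foldFrom cs k (bs, be, d, st) = (bs, be, d2, st)) := by
  intro fuel
  induction fuel with
  | zero => intro k h; omega
  | succ fuel ih =>
    intro k hfuel
    by_cases h : k < cs.length
    · by_cases hcl : cs[k] = '}'
      · have heq : matchCloseAux cs k = some ⟨k, le_rfl, h⟩ := by
          rw [matchCloseAux, dif_pos h, if_pos hcl]
        refine ⟨?_, ?_⟩
        · intro M hM
          rw [heq] at hM
          cases hM
          refine ⟨hcl, fun bs be st d hd => ?_⟩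
          rw [foldFrom_succ cs k _ h, hcl]
        · intro hn; rw [heq] at hn; exact absurd hn (by simp)
      · by_cases hop : cs[k] = '{'
        · rcases h1 : matchCloseAux cs (k + 1) with _ | ⟨m, hm⟩
          · have heq : matchCloseAux cs k = none := by
              rw [matchCloseAux, dif_pos h, if_neg hcl, if_pos hop, h1]
            refine ⟨?_, ?_⟩
            · intro M hM; rw [heq] at hM; exact absurd hM (by simp)
            · intro _ bs be st d hd
              rw [foldFrom_succ cs k _ h]
              have hstep : stepA (bs, be, d, st) ((k : Int), cs[k]) = (bs, be, d + 1, st) := by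
                simp [stepA, hop, show d ≠ 0 by omega]
              rw [hstep]
              exact (ih (k + 1) (by omega)).2 h1 bs be st (d + 1) (by omega)
          · obtain ⟨hmch, hmfold⟩ := (ih (k + 1) (by omega)).1 ⟨m, hm⟩ h1
            have hchain : ∀ bs be st (d : Int), 1 ≤ d →
                foldFrom cs k (bs, be, d, st) = foldFrom cs (m + 1) (bs, be, d, st) := by
              intro bs be st d hd
              rw [foldFrom_succ cs k _ h]
              have hstep : stepA (bs, be, d, st) ((k : Int), cs[k]) = (bs, be, d + 1, st) := by
                simp [stepA, hop, show d ≠ 0 by omega]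
              rw [hstep, hmfold bs be st (d + 1) (by omega)]
              have hstep2 : stepA (bs, be, d + 1, st) ((m : Int), '}') = (bs, be, d, st) := by
                simp [stepA, show (0 : Int) < d + 1 by omega, show d ≠ 0 by omega]
              rw [hstep2]
            rcases h2 : matchCloseAux cs (m + 1) with _ | ⟨m', hm'⟩
            · have heq : matchCloseAux cs k = none := by
                rw [matchCloseAux, dif_pos h, if_neg hcl, if_pos hop]
                simp only [h1, h2]
              refine ⟨?_, ?_⟩
              · intro M hM; rw [heq] at hM; exact absurd hM (by simp)
              · intro _ bs be st d hd
                obtain ⟨d2, hval⟩ := (ih (m + 1) (by omega)).2 h2 bs be st d hd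
                rw [hchain bs be st d hd, hval]
                exact ⟨d2, rfl⟩
            · have heq : matchCloseAux cs k = some ⟨m', by omega, hm'.2⟩ := by
                rw [matchCloseAux, dif_pos h, if_neg hcl, if_pos hop]
                simp only [h1, h2]
              obtain ⟨hc', hfold'⟩ := (ih (m + 1) (by omega)).1 ⟨m', hm'⟩ h2
              refine ⟨?_, ?_⟩
              · intro M hM
                rw [heq] at hM
                cases hM
                refine ⟨hc', fun bs be st d hd => ?_⟩
                rw [hchain bs be st d hd, hfold' bs be st d hd]
              · intro hn; rw [heq] at hn; exact absurd hn (by simp)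
        · have hstep : ∀ (acc : Int × Int × Int × Int),
              stepA acc ((k : Int), cs[k]) = acc := by
            intro acc; simp [stepA, hop, hcl]
          rcases h1 : matchCloseAux cs (k + 1) with _ | ⟨m, hm⟩
          · have heq : matchCloseAux cs k = none := by
              rw [matchCloseAux, dif_pos h, if_neg hcl, if_neg hop, h1]
            refine ⟨?_, ?_⟩
            · intro M hM; rw [heq] at hM; exact absurd hM (by simp)
            · intro _ bs be st d hd
              rw [foldFrom_succ cs k _ h, hstep]
              exact (ih (k + 1) (by omega)).2 h1 bs be st d hd
          · have heq : matchCloseAux cs k = some ⟨m, by omega, hm.2⟩ := by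
              rw [matchCloseAux, dif_pos h, if_neg hcl, if_neg hop, h1]
            obtain ⟨hc', hfold'⟩ := (ih (k + 1) (by omega)).1 ⟨m, hm⟩ h1
            refine ⟨?_, ?_⟩
            · intro M hM
              rw [heq] at hM
              cases hM
              refine ⟨hc', fun bs be st d hd => ?_⟩
              rw [foldFrom_succ cs k _ h, hstep]
              exact hfold' bs be st d hd
            · intro hn; rw [heq] at hn; exact absurd hn (by simp)
    · have heq : matchCloseAux cs k = none := by rw [matchCloseAux, dif_neg h]
      refine ⟨?_, ?_⟩
      · intro M hM; rw [heq] at hM; exact absurd hM (by simp)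
      · intro _ bs be st d hd
        exact ⟨d, foldFrom_end cs k _ (by omega)⟩

-- B's outer loop against A's scan at depth 0
theorem loop_spec (cs : List Char) : ∀ fuel p best bs be (st : Int), cs.length - p < fuel →
    BestRel best bs be →
    BestRel (bLoop cs p best) (foldFrom cs p (bs, be, 0, st)).1
      (foldFrom cs p (bs, be, 0, st)).2.1 := by
  intro fuel
  induction fuel with
  | zero => intro p best bs be st h; omega
  | succ fuel ih =>
    intro p best bs be st hfuel hrel
    rcases hf : findBraceAux cs p with _ | ⟨i, hi⟩
    · rw [bLoop]
      simp only [hf]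
      by_cases hp : cs.length ≤ p
      · rw [foldFrom_end cs _ _ hp]; exact hrel
      · have hno : ∀ q (hq : q < cs.length), p ≤ q → cs[q] ≠ '{' :=
          findBrace_none cs (cs.length - p + 1) p (by omega) hf
        have hskip := skip_fold cs (cs.length - p + 1) p cs.length le_rfl (by omega) (by omega)
          (fun q hq h1 _ => hno q hq h1) bs be st
        rw [hskip, foldFrom_end cs _ _ le_rfl]
        exact hrel
    · obtain ⟨hchar, hprev⟩ := findBrace_some cs (cs.length - p + 1) p ⟨i, hi⟩ (by omega) hf
      have hskip := skip_fold cs (i - p + 1) p i (le_of_lt hi.2) hi.1 (by omega)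
        (fun q hq h1 h2 => hprev q hq h1 h2) bs be st
      have hopen : stepA (bs, be, 0, st) ((i : Int), cs[i]'hi.2) = (bs, be, 1, (i : Int)) := by
        simp [stepA, hchar]
      rcases hm : matchCloseAux cs (i + 1) with _ | ⟨m, hm2⟩
      · obtain ⟨d2, hval⟩ := (match_spec cs (cs.length + 1) (i + 1) (by omega)).2 hm
          bs be (i : Int) 1 le_rfl
        rw [bLoop]
        simp only [hf, hm]
        rw [hskip, foldFrom_succ cs i _ hi.2, hopen, hval]
        exact hrel
      · obtain ⟨hc2, hfold⟩ := (match_spec cs (cs.length + 1) (i + 1) (by omega)).1 ⟨m, hm2⟩ hm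
        have hclose : stepA (bs, be, 1, (i : Int)) ((m : Int), '}') =
            (if bs = -1 ∨ (m : Int) - (i : Int) > be - bs
             then ((i : Int), (m : Int), 0, -1) else (bs, be, 0, -1)) := by
          simp only [stepA]
          rw [if_neg (by decide), if_pos (by decide), if_pos (by omega),
            if_pos ⟨by omega, by omega⟩]
          split_ifs <;> simp
        have hchain : foldFrom cs p (bs, be, 0, st) =
            foldFrom cs (m + 1) (if bs = -1 ∨ (m : Int) - (i : Int) > be - bs
              then ((i : Int), (m : Int), 0, -1) else (bs, be, 0, -1)) := by
          rw [hskip, foldFrom_succ cs i _ hi.2, hopen, hfold bs be (i : Int) 1 le_rfl,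
            hclose]
        rw [bLoop]
        simp only [hf, hm]
        rw [hchain]
        rcases best with _ | ⟨a, b⟩
        · obtain ⟨rfl, rfl⟩ := hrel
          show BestRel (bLoop cs (m + 1) (some (i, m))) _ _
          rw [if_pos (Or.inl rfl)]
          exact ih (m + 1) (some (i, m)) _ _ (-1) (by omega) ⟨rfl, rfl⟩
        · obtain ⟨rfl, rfl⟩ := hrel
          have hne : ¬((a : Int) = -1) := by omega
          show BestRel (bLoop cs (m + 1)
            (if (m : Int) - (i : Int) > (b : Int) - (a : Int)
             then some (i, m) else some (a, b))) _ _
          by_cases hcond : (m : Int) - (i : Int) > (b : Int) - (a : Int)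
          · rw [if_pos (Or.inr hcond), if_pos hcond]
            exact ih (m + 1) (some (i, m)) _ _ (-1) (by omega) ⟨rfl, rfl⟩
          · rw [if_neg hcond, if_neg (by tauto)]
            exact ih (m + 1) (some (a, b)) _ _ (-1) (by omega) ⟨rfl, rfl⟩

-- ===== VERDICT (by name: the statement is the Claim_ definition above) =====
theorem largest_brace_json_py_spec : Claim_equal_largest_brace_json_py := by
  intro s _
  unfold Spec_largest_brace_json_py largest_brace_json_py largest_brace_json_py_alt
  by_cases hnil : s.toList = []
  · rw [if_pos hnil, bLoop]
    simp only [show findBraceAux s.toList 0 = none by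
      rw [findBraceAux, dif_neg (by simp [hnil])]]
  · have hrel := loop_spec s.toList (s.toList.length + 1) 0 none (-1) (-1) (-1)
      (by omega) ⟨rfl, rfl⟩
    have h0 : foldFrom s.toList 0 (-1, -1, 0, -1) =
        (PySem.List.enumerate s.toList 0).foldl stepA (-1, -1, 0, -1) := by
      simp [foldFrom]
    rw [if_neg hnil]
    rcases hB : bLoop s.toList 0 none with _ | ⟨a, b⟩
    · rw [hB] at hrel
      obtain ⟨h1, h2⟩ := hrel
      rw [h0] at h1 h2
      rw [if_neg (by rw [h1]; simp)]
    · rw [hB] at hrel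
      obtain ⟨h1, h2⟩ := hrel
      rw [h0] at h1 h2
      rw [if_pos ⟨by rw [h1]; omega, by rw [h2]; omega⟩, h1, h2]
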